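-- pv_equiv track=rewrite | github.com/RawIron/etl-aggregate-tb | single-core-python/q1_loops.py | get_leaders
-- ===== SOURCE A (Python) =====
-- def get_leaders(leaderboard, first_n=1):
--     top_n = []
--     max_counter, _ = leaderboard[0]
--     first_n -= 1
--     for counter, name in leaderboard:
--         if counter == max_counter:
--             top_n.append((counter, name))
--         elif first_n > 0:
--             top_n.append((counter, name))
--             max_counter = counter
--             first_n -= 1
--         else:
--             break
--     return top_n
-- ===== SOURCE B (Python) =====
-- def get_leaders(leaderboard, first_n=1):
--     # Split the leaderboard into maximal runs of equal counters,
--     # then keep the first max(first_n, 1) runs, flattened.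
--     groups = []
--     rest = leaderboard
--     while rest:
--         c = rest[0][0]
--         i = 1
--         while i < len(rest) and rest[i][0] == c:
--             i += 1
--         groups.append(rest[:i])
--         rest = rest[i:]
--     out = []
--     for grp in groups[:max(first_n, 1)]:
--         for counter, name in grp:
--             out.append((counter, name))
--     return out
-- ===== Notes on version B (the rewrite author's own statement) =====
-- stated objective: alternative
-- what changed: B splits the list into maximal runs of equal counters and flattens the first max(first_n,1) runs, replacing A's per-entry loop with a decrementing budget and three-way branch.
import Mathlib
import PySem

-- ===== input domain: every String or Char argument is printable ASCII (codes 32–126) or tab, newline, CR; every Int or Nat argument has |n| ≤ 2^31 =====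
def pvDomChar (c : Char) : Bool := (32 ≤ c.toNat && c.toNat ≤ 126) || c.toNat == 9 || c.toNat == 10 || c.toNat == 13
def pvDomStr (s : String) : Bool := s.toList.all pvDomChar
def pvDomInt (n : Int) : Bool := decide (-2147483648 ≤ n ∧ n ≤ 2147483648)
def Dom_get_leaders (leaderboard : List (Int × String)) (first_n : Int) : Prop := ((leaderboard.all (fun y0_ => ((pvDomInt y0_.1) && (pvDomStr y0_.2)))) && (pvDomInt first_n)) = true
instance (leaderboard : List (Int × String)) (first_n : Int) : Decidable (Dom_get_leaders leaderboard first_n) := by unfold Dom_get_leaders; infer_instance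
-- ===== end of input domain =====

-- B replaces A's per-entry loop (decrementing budget, three-way branch) by splitting the
-- list into maximal runs of equal counters and flattening the first max(first_n,1) runs;
-- same cost, different decomposition.

-- ===== PORT A =====
-- A's for-loop with mutable state (max_counter, first_n) and break, as recursion on the list.
def getLeadersGo (max_counter : Int) (fn : Int) : List (Int × String) → List (Int × String)
  | [] => []
  | (counter, name) :: rest =>
    if counter == max_counter then (counter, name) :: getLeadersGo max_counter fn rest
    else if fn > 0 then (counter, name) :: getLeadersGo counter (fn - 1) rest
    else []

def get_leaders (leaderboard : List (Int × String)) (first_n : Int) : List (Int × String) :=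
  match leaderboard with
  | [] => []  -- Python raises IndexError here (leaderboard[0]); excluded by Pre_get_leaders
  | (c0, _) :: _ => getLeadersGo c0 (first_n - 1) leaderboard

-- ===== PORT B =====
-- Source B's outer while loop: peel off the maximal run of the head counter (rest[:i] / rest[i:]),
-- here takeWhile / dropWhile; the fuel argument (initialised to the list length, which bounds
-- the number of loop iterations) only makes the recursion structural and is never exhausted.
def runsOfGo : Nat → List (Int × String) → List (List (Int × String))
  | _, [] => []
  | 0, _ :: _ => []  -- fuel exhausted: unreachable when fuel ≥ length of the list
  | fuel + 1, x :: xs =>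
    (x :: xs.takeWhile (fun y => y.1 == x.1)) :: runsOfGo fuel (xs.dropWhile (fun y => y.1 == x.1))

def runsOf (l : List (Int × String)) : List (List (Int × String)) :=
  runsOfGo l.length l

def get_leaders_alt (leaderboard : List (Int × String)) (first_n : Int) : List (Int × String) :=
  ((runsOf leaderboard).take (max first_n 1).toNat).flatten

-- ===== PRECONDITION & SPEC =====
-- Pre_ excludes exactly the empty leaderboard, on which A raises IndexError.
def Pre_get_leaders (leaderboard : List (Int × String)) (first_n : Int) : Prop :=
  leaderboard ≠ []
instance (leaderboard : List (Int × String)) (first_n : Int) : Decidable (Pre_get_leaders leaderboard first_n) := by unfold Pre_get_leaders; infer_instance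

def pvWitness_get_leaders : (List (Int × String)) × Int := ([(3, "a"), (3, "b"), (2, "c")], 2)

def Spec_get_leaders (leaderboard : List (Int × String)) (first_n : Int) (out : List (Int × String)) : Prop := out = get_leaders_alt leaderboard first_n
instance (leaderboard : List (Int × String)) (first_n : Int) (out : List (Int × String)) : Decidable (Spec_get_leaders leaderboard first_n out) := by unfold Spec_get_leaders; infer_instance

-- ===== CLAIM (what is proved, stated in full; the proofs are below) =====
def Claim_equal_get_leaders : Prop := ∀ (leaderboard : List (Int × String)) (first_n : Int), Dom_get_leaders leaderboard first_n → Pre_get_leaders leaderboard first_n → Spec_get_leaders leaderboard first_n (get_leaders leaderboard first_n)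

-- ===== LEMMAS AND PROOFS =====

-- runsOfGo ignores the fuel as long as it is at least the list length.
theorem runsOfGo_congr : ∀ (fuel₁ fuel₂ : Nat) (l : List (Int × String)),
    l.length ≤ fuel₁ → l.length ≤ fuel₂ → runsOfGo fuel₁ l = runsOfGo fuel₂ l := by
  intro fuel₁
  induction fuel₁ with
  | zero =>
    intro fuel₂ l h₁ _
    have : l = [] := List.eq_nil_of_length_eq_zero (Nat.le_zero.mp h₁)
    subst this
    cases fuel₂ <;> rfl
  | succ fuel₁ ih =>
    intro fuel₂ l h₁ h₂
    cases l with
    | nil => cases fuel₂ <;> rfl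
    | cons x xs =>
      cases fuel₂ with
      | zero => simp at h₂
      | succ fuel₂ =>
        simp only [runsOfGo]
        have hd : (xs.dropWhile (fun y => y.1 == x.1)).length ≤ xs.length :=
          List.length_dropWhile_le _ _
        have hl₁ : xs.length ≤ fuel₁ := by simpa using h₁
        have hl₂ : xs.length ≤ fuel₂ := by simpa using h₂
        rw [ih fuel₂ _ (le_trans hd hl₁) (le_trans hd hl₂)]

theorem runsOf_cons (x : Int × String) (xs : List (Int × String)) :
    runsOf (x :: xs) =
      (x :: xs.takeWhile (fun y => y.1 == x.1)) :: runsOf (xs.dropWhile (fun y => y.1 == x.1)) := by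
  simp only [runsOf, List.length_cons, runsOfGo]
  exact congrArg _ (runsOfGo_congr _ _ _ (List.length_dropWhile_le _ _) le_rfl)

-- A's loop from state (c, fn) emits the current run of counter c, then spends its budget fn
-- on the following runs: the flatten of the first fn.toNat further runs.
theorem getLeadersGo_eq_runs (l : List (Int × String)) : ∀ (c : Int) (fn : Int),
    getLeadersGo c fn l =
      l.takeWhile (fun y => y.1 == c) ++
        ((runsOf (l.dropWhile (fun y => y.1 == c))).take fn.toNat).flatten := by
  induction l with
  | nil => intro c fn; simp [getLeadersGo, runsOf, runsOfGo]
  | cons x xs ih =>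
    intro c fn
    obtain ⟨cx, nx⟩ := x
    by_cases h : cx = c
    · subst h
      simp only [getLeadersGo, List.takeWhile_cons, List.dropWhile_cons]
      simp only [beq_self_eq_true, if_true]
      rw [ih]
      rfl
    · have hb : ((cx, nx).1 == c) = false := by simp [h]
      simp only [getLeadersGo, List.takeWhile_cons, List.dropWhile_cons, hb,
        Bool.false_eq_true, if_false, List.nil_append]
      by_cases hfn : fn > 0
      · have hto : fn.toNat = (fn - 1).toNat + 1 := by omega
        rw [if_pos hfn, hto, runsOf_cons]
        simp only [List.take_succ_cons, List.flatten_cons]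
        rw [ih]
        rfl
      · have hto : fn.toNat = 0 := by omega
        rw [if_neg hfn, hto]
        simp

-- ===== VERDICT (by name: the statement is the Claim_ definition above) =====
theorem get_leaders_spec : Claim_equal_get_leaders := by
  intro leaderboard first_n _ hpre
  unfold Spec_get_leaders
  match leaderboard with
  | [] => exact absurd rfl hpre
  | (c0, n0) :: rest =>
    show getLeadersGo c0 (first_n - 1) ((c0, n0) :: rest) = _
    rw [getLeadersGo_eq_runs]
    unfold get_leaders_alt
    rw [runsOf_cons]
    have hk : (max first_n 1).toNat = (first_n - 1).toNat + 1 := by omega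
    rw [hk]
    simp only [List.take_succ_cons, List.flatten_cons, List.takeWhile_cons,
      List.dropWhile_cons, beq_self_eq_true, if_true]
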